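-- pv_equiv track=rewrite | github.com/jkbockstael/adventofcode-2017 | day06_part1.py | reallocate
-- ===== SOURCE A (Python) =====
-- def reallocate(memory):
--     cell = memory.index(max(memory))
--     value = memory[cell]
--     memory[cell] = 0
--     while value > 0:
--         cell = (cell + 1) % len(memory)
--         memory[cell] = memory[cell] + 1
--         value = value - 1
--     return memory
-- ===== SOURCE B (Python) =====
-- def reallocate(memory):
--     # Arithmetic redistribution: divmod decides every cell's share in one pass.
--     n = len(memory)
--     cell = memory.index(max(memory))
--     value = memory[cell]
--     memory[cell] = 0
--     if value > 0:
--         q, r = divmod(value, n)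
--         for i in range(n):
--             memory[i] += q + (1 if (i - cell - 1) % n < r else 0)
--     return memory
-- ===== Notes on version B (the rewrite author's own statement) =====
-- stated objective: alternative
-- what changed: B replaces A's while loop that hands out the blocks one at a time by a divmod-based arithmetic distribution: every cell gets value//n and the value%n cells after the emptied one get one extra, computed in a single pass over the list.
-- outside the precondition, e.g. on reallocate([]): A raises ValueError, B raises ValueError
import Mathlib
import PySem

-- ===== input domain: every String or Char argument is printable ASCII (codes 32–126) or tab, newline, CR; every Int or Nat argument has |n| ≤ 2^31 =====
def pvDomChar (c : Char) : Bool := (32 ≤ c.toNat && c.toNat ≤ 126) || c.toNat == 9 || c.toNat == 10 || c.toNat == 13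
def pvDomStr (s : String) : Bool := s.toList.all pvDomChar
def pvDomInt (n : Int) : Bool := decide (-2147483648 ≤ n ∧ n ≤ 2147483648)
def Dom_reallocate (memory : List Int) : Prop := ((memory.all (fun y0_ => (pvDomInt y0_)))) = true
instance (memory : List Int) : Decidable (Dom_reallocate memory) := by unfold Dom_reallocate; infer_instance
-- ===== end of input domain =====

-- B replaces A's one-increment-at-a-time while loop by a divmod-based arithmetic
-- distribution in a single pass over the list (an alternative algorithm); A mutates its
-- argument in place (B performs the same mutation in Python) — the equivalence proved
-- here is about the return value.

-- ===== PORT A =====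
-- the while loop: cell = (cell+1) % len(memory); memory[cell] += 1; value -= 1
-- (the index (cell+1) % len is always in range, so List.modify is exact for memory[cell] += 1)
def pvLoopA (mem : List Int) (cell : Int) (value : Int) : List Int :=
  if 0 < value then
    let c' := PySem.Int.mod (cell + 1) (mem.length : Int)
    pvLoopA (mem.modify c'.toNat (· + 1)) c' (value - 1)
  else mem
termination_by value.toNat
decreasing_by omega

def reallocate (memory : List Int) : List Int :=
  match PySem.List.max? memory (fun y => y) with
  | none => []  -- max([]) raises ValueError: excluded by Pre_
  | some mx =>
    match PySem.List.index? memory mx with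
    | none => []  -- unreachable: mx ∈ memory
    | some cell =>
      -- cell is in range (it comes from .index), so getD is exact for memory[cell]
      let value := memory.getD cell 0
      pvLoopA (memory.set cell 0) (cell : Int) value

-- ===== PORT B =====
def reallocate_alt (memory : List Int) : List Int :=
  let n : Int := memory.length
  match PySem.List.max? memory (fun y => y) with
  | none => []  -- max([]) raises ValueError: excluded by Pre_
  | some mx =>
    match PySem.List.index? memory mx with
    | none => []  -- unreachable: mx ∈ memory
    | some cell =>
      let value := memory.getD cell 0
      let base := memory.set cell 0
      if value > 0 then
        let q := PySem.Int.floordiv value n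
        let r := PySem.Int.mod value n
        -- for i in range(n): memory[i] += q + (1 if (i - cell - 1) % n < r else 0)
        base.mapIdx (fun i x =>
          x + q + (if PySem.Int.mod ((i : Int) - (cell : Int) - 1) n < r then 1 else 0))
      else base

-- ===== PRECONDITION & SPEC =====
-- Pre_ excludes only the empty list, on which Python's max([]) raises ValueError.
def Pre_reallocate (memory : List Int) : Prop := memory ≠ []
instance (memory : List Int) : Decidable (Pre_reallocate memory) := by unfold Pre_reallocate; infer_instance
def pvWitness_reallocate : List Int := [0, 2, 7, 0]

def Spec_reallocate (memory : List Int) (out : List Int) : Prop := out = reallocate_alt memory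
instance (memory : List Int) (out : List Int) : Decidable (Spec_reallocate memory out) := by unfold Spec_reallocate; infer_instance

-- ===== CLAIM (what is proved, stated in full; the proofs are below) =====
def Claim_equal_reallocate : Prop := ∀ (memory : List Int), Dom_reallocate memory → Pre_reallocate memory → Spec_reallocate memory (reallocate memory)

-- ===== LEMMAS AND PROOFS =====

theorem pv_succ_mod (v n : Nat) (h : 0 < n) : (v+1) % n = if v % n + 1 = n then 0 else v % n + 1 := by
  have hd := Nat.div_add_mod v n
  have hm := Nat.mod_lt v h
  split_ifs with h1
  · have h2 : v + 1 = n * (v/n + 1) := by rw [Nat.mul_succ]; omega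
    rw [h2, Nat.mul_mod_right]
  · have h2 : v + 1 = v % n + 1 + n * (v/n) := by omega
    rw [h2, Nat.add_mul_mod_self_left, Nat.mod_eq_of_lt (by omega)]

theorem pv_succ_div (v n : Nat) (h : 0 < n) : (v+1) / n = if v % n + 1 = n then v/n + 1 else v/n := by
  have hd := Nat.div_add_mod v n
  have hm := Nat.mod_lt v h
  split_ifs with h1
  · have h2 : v + 1 = n * (v/n + 1) := by rw [Nat.mul_succ]; omega
    rw [h2, Nat.mul_div_cancel_left _ h]
  · have h2 : v + 1 = v % n + 1 + n * (v/n) := by omega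
    rw [h2, Nat.add_mul_div_left _ _ h, Nat.div_eq_of_lt (by omega)]
    omega

-- how many k < v have k ≡ t (mod n)
theorem pv_count_mod (n t : Nat) (hn : 0 < n) (ht : t < n) (v : Nat) :
    ((List.range v).filter (fun k => k % n = t)).length = v / n + (if t < v % n then 1 else 0) := by
  induction v with
  | zero => simp
  | succ v ih =>
    rw [List.range_succ, List.filter_append, List.length_append, ih]
    rw [pv_succ_mod v n hn, pv_succ_div v n hn]
    simp only [List.filter_cons, List.filter_nil]
    split_ifs <;> simp_all <;> omega

-- one step of the while loop, seen on the increment counts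
theorem pv_cnt_succ (n c i v : Nat) :
    ((List.range (v+1)).filter (fun k : Nat => ((c:Int)+1+(k:Int)) % (n:Int) = (i:Int))).length
    = (if (c+1) % n = i then 1 else 0)
      + ((List.range v).filter (fun k : Nat => (((((c+1)%n : Nat)):Int)+1+(k:Int)) % (n:Int) = (i:Int))).length := by
  rw [List.range_succ_eq_map, List.filter_cons, List.filter_map]
  have hpred : ∀ k ∈ List.range v,
      (((fun k : Nat => decide (((c:Int)+1+(k:Int)) % (n:Int) = (i:Int))) ∘ Nat.succ) k)
      = (decide ((((((c+1)%n : Nat)):Int)+1+(k:Int)) % (n:Int) = (i:Int))) := by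
    intro k _
    simp only [Function.comp_apply]
    have h2 : (((((c+1)%n : Nat)):Int)+1+(k:Int)) % (n:Int) = ((c:Int)+1+((Nat.succ k : Nat):Int)) % (n:Int) := by
      have h1 : ((((c+1)%n : Nat)):Int) + 1 + (k:Int) = ((c+1 : Nat):Int) % (n:Int) + (1 + k) := by
        rw [Int.natCast_mod]; ring
      rw [h1, Int.emod_add_emod]; push_cast; ring_nf
    rw [h2]
  rw [List.filter_congr hpred]
  have hhead : (decide (((c:Int)+1+((0:Nat):Int)) % (n:Int) = (i:Int))) = decide ((c+1) % n = i) := by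
    have h3 : ((c:Int)+1+((0:Nat):Int)) % (n:Int) = (((c+1) % n : Nat) : Int) := by
      rw [Int.natCast_mod]; push_cast; ring_nf
    rw [h3]
    simp only [decide_eq_decide]
    exact_mod_cast Iff.rfl
  rw [hhead]
  split_ifs <;> simp_all <;> try omega

theorem pvLoopA_length (mem : List Int) (cell value : Int) :
    (pvLoopA mem cell value).length = mem.length := by
  fun_induction pvLoopA with
  | case1 mem cell value h c' ih => rw [ih]; simp
  | case2 => rfl

theorem pvLoopA_getElem (mem : List Int) (c v : Nat) (hc : c < mem.length)
    (i : Nat) (hi : i < mem.length) :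
    (pvLoopA mem (c : Int) (v : Int)).getD i 0 =
      mem.getD i 0 + (((List.range v).filter
        (fun k : Nat => ((c : Int) + 1 + (k : Int)) % (mem.length : Int) = (i : Int))).length : Int) := by
  induction v generalizing mem c with
  | zero =>
    rw [pvLoopA.eq_def]
    simp
  | succ v ih =>
    rw [pvLoopA.eq_def]
    have hn : 0 < mem.length := by omega
    rw [if_pos (by exact_mod_cast Nat.succ_pos v)]
    have hmodc : PySem.Int.mod ((c:Int) + 1) (mem.length : Int) = (((c+1) % mem.length : Nat) : Int) := by
      rw [show ((c:Int) + 1) = (((c+1 : Nat)):Int) by push_cast; ring]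
      exact PySem.Int.mod_natCast _ _
    have hv1 : (((v+1 : Nat)):Int) - 1 = (v:Int) := by push_cast; ring
    simp only [hmodc, hv1, Int.toNat_natCast]
    have hlt : (c+1) % mem.length < mem.length := Nat.mod_lt _ hn
    have hlen : (mem.modify ((c+1) % mem.length) (· + 1)).length = mem.length := List.length_modify ..
    rw [ih (mem.modify ((c+1) % mem.length) (· + 1)) ((c+1) % mem.length) (by rw [hlen]; exact hlt) (by rw [hlen]; exact hi)]
    rw [hlen]
    have hmod : (mem.modify ((c+1) % mem.length) (· + 1)).getD i 0
        = mem.getD i 0 + (if (c+1) % mem.length = i then 1 else 0) := by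
      simp only [List.getD, List.getElem?_modify]
      rw [List.getElem?_eq_getElem hi]
      split_ifs <;> simp
    rw [hmod, pv_cnt_succ mem.length c i v]
    push_cast
    ring

-- the closed form of the increment count: full rounds plus one for the first v % n cells
theorem pv_cnt_closed (n c i v : Nat) (hn : 0 < n) (hi : i < n) :
    ((((List.range v).filter
        (fun k : Nat => ((c : Int) + 1 + (k : Int)) % (n : Int) = (i : Int))).length : Nat) : Int)
      = PySem.Int.floordiv (v : Int) (n : Int)
        + (if PySem.Int.mod ((i : Int) - (c : Int) - 1) (n : Int) < PySem.Int.mod (v : Int) (n : Int)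
           then 1 else 0) := by
  have hn' : (0:Int) < (n:Int) := by exact_mod_cast hn
  have hnz : (n:Int) ≠ 0 := by omega
  set t : Int := ((i:Int) - (c:Int) - 1) % (n:Int) with hT
  have ht0 : 0 ≤ t := Int.emod_nonneg _ hnz
  have htl : t < (n:Int) := Int.emod_lt_of_pos _ hn'
  have htT : t = ((t.toNat : Nat) : Int) := by omega
  have hTn : t.toNat < n := by omega
  have hpred : ∀ k ∈ List.range v,
      (decide (((c : Int) + 1 + (k : Int)) % (n : Int) = (i : Int)))
      = (decide (k % n = t.toNat)) := by
    intro k _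
    simp only [decide_eq_decide]
    have hi' : (i:Int) % (n:Int) = (i:Int) := Int.emod_eq_of_lt (by omega) (by omega)
    constructor
    · intro h
      have hd : (n:Int) ∣ ((c:Int) + 1 + k - i) := by
        rw [← PySem.Int.emod_eq_zero_iff_dvd]
        rw [← Int.emod_eq_emod_iff_emod_sub_eq_zero, h, hi']
      have hd2 : (n:Int) ∣ ((k:Int) - ((i:Int) - c - 1)) := by
        have he : ((k:Int) - ((i:Int) - c - 1)) = ((c:Int) + 1 + k - i) := by ring
        rw [he]; exact hd
      have hkt : ((k:Int)) % (n:Int) = t := by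
        rw [hT, Int.emod_eq_emod_iff_emod_sub_eq_zero, PySem.Int.emod_eq_zero_iff_dvd]
        exact hd2
      have hk : ((k % n : Nat) : Int) = ((t.toNat : Nat) : Int) := by
        rw [Int.natCast_mod, hkt, ← htT]
      exact_mod_cast hk
    · intro h
      have h' : ((k:Int)) % (n:Int) = t := by
        rw [← Int.natCast_mod, h, ← htT]
      have hd2 : (n:Int) ∣ ((k:Int) - ((i:Int) - c - 1)) := by
        rw [← PySem.Int.emod_eq_zero_iff_dvd, ← Int.emod_eq_emod_iff_emod_sub_eq_zero, h', hT]
      have hd : (n:Int) ∣ ((c:Int) + 1 + k - i) := by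
        have he : ((c:Int) + 1 + k - i) = ((k:Int) - ((i:Int) - c - 1)) := by ring
        rw [he]; exact hd2
      rw [show ((i:Int)) = (i:Int) % (n:Int) from hi'.symm, Int.emod_eq_emod_iff_emod_sub_eq_zero,
        PySem.Int.emod_eq_zero_iff_dvd]
      exact hd
  rw [List.filter_congr hpred, pv_count_mod n t.toNat hn hTn v]
  rw [PySem.Int.floordiv_natCast, PySem.Int.mod_natCast,
    PySem.Int.mod_eq_emod_of_pos hn', ← hT]
  push_cast
  split_ifs <;> omega

-- ===== VERDICT (by name: the statement is the Claim_ definition above) =====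
theorem reallocate_spec : Claim_equal_reallocate := by
  intro memory _ hpre
  unfold Spec_reallocate reallocate reallocate_alt
  cases hmx : PySem.List.max? memory (fun y => y) with
  | none => exact absurd ((PySem.List.max?_eq_none_iff memory _).mp hmx) hpre
  | some mx =>
    cases hidx : PySem.List.index? memory mx with
    | none =>
      exact absurd (PySem.List.max?_mem hmx)
        ((PySem.List.index?_eq_none_iff memory mx).mp hidx)
    | some cell =>
      obtain ⟨hcell, -, -⟩ := PySem.List.getElem_of_index?_eq_some hidx
      dsimp only
      rw [hidx]
      dsimp only
      set value : Int := memory.getD cell 0 with hval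
      set base : List Int := memory.set cell 0 with hbase
      have hblen : base.length = memory.length := List.length_set
      by_cases hv : value > 0
      · rw [if_pos hv]
        have hvN : value = ((value.toNat : Nat) : Int) := by omega
        apply List.ext_getElem
        · rw [pvLoopA_length, hblen, List.length_mapIdx, hblen]
        · intro i h1 h2
          have hilen : i < memory.length := by
            rw [← hblen]; rw [List.length_mapIdx] at h2; exact h2
          have hib : i < base.length := by rw [hblen]; exact hilen
          have hcb : cell < base.length := by rw [hblen]; exact hcell
          rw [List.getElem_mapIdx]
          conv_lhs => rw [← List.getD_eq_getElem _ 0 h1, hvN,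
            pvLoopA_getElem base cell value.toNat hcb i hib]
          rw [hblen, pv_cnt_closed memory.length cell i value.toNat (by omega) hilen,
            List.getD_eq_getElem _ 0 hib, ← hvN]
          ring
      · rw [if_neg hv, pvLoopA.eq_def, if_neg hv]
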